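-- pv_equiv track=rewrite | github.com/DaChosens1/usaco | 2015/Febuary/February 2015 Prob 2/2015_2_cow.py | follow_through
-- ===== SOURCE A (Python) =====
-- def follow_through(text):
--     c = 0
--     co = 0
--     cow = 0
--     for char in text:
--         if char == "C":
--             c += 1
--         elif char == "O":
--             co += c
--         elif char == "W":
--             cow += co
--     return cow
-- ===== SOURCE B (Python) =====
-- def follow_through(text):
--     w_remaining = text.count("W")
--     c_before = 0
--     ans = 0
--     for char in text:
--         if char == "C":
--             c_before += 1
--         elif char == "W":
--             w_remaining -= 1
--         elif char == "O":
--             ans += c_before * w_remaining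
--     return ans
-- ===== Notes on version B (the rewrite author's own statement) =====
-- stated objective: alternative
-- what changed: Instead of threading three chained left-to-right accumulators, B precomputes the total count of the last letter and, pivoting on each middle letter, adds count-of-first-letter-before times count-of-last-letter-after in a single scan.
import Mathlib
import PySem

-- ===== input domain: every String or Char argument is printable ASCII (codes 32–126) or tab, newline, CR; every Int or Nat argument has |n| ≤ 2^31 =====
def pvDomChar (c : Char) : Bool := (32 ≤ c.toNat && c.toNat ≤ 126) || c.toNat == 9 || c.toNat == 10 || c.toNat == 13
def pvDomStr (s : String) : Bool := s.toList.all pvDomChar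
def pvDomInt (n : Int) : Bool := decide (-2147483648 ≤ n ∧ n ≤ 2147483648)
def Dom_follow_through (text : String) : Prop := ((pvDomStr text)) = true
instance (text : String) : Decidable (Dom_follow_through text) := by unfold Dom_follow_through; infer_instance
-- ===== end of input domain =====

-- B pivots on 'O' (c_before * w_remaining per 'O') instead of A's three chained accumulators; alternative decomposition, same cost.

-- ===== PORT A =====
-- loop over text with accumulators c, co, cow
def pvFaLoop : List Char → Int → Int → Int → Int
  | [], _, _, cow => cow
  | x :: t, c, co, cow =>
    if x = 'C' then pvFaLoop t (c + 1) co cow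
    else if x = 'O' then pvFaLoop t c (co + c) cow
    else if x = 'W' then pvFaLoop t c co (cow + co)
    else pvFaLoop t c co cow

def follow_through (text : String) : Int := pvFaLoop text.toList 0 0 0

-- ===== PORT B =====
-- port of text.count("W") for a single character: exact, counts occurrences of 'W'
def pvCountW : List Char → Int
  | [] => 0
  | x :: t => (if x = 'W' then 1 else 0) + pvCountW t

-- loop over text with c_before, w_remaining, ans
def pvGbLoop : List Char → Int → Int → Int → Int
  | [], _, _, ans => ans
  | x :: t, cb, wr, ans =>
    if x = 'C' then pvGbLoop t (cb + 1) wr ans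
    else if x = 'W' then pvGbLoop t cb (wr - 1) ans
    else if x = 'O' then pvGbLoop t cb wr (ans + cb * wr)
    else pvGbLoop t cb wr ans

def follow_through_alt (text : String) : Int :=
  pvGbLoop text.toList 0 (pvCountW text.toList) 0

-- ===== PRECONDITION & SPEC =====
def Spec_follow_through (text : String) (out : Int) : Prop := out = follow_through_alt text
instance (text : String) (out : Int) : Decidable (Spec_follow_through text out) := by unfold Spec_follow_through; infer_instance

-- ===== CLAIM (what is proved, stated in full; the proofs are below) =====
def Claim_equal_follow_through : Prop := ∀ (text : String), Dom_follow_through text → Spec_follow_through text (follow_through text)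

-- ===== LEMMAS AND PROOFS =====
theorem pvGbLoop_add (l : List Char) : ∀ (cb wr a : Int), pvGbLoop l cb wr a = a + pvGbLoop l cb wr 0 := by
  induction l with
  | nil => intro cb wr a; simp [pvGbLoop]
  | cons x t ih =>
    intro cb wr a
    simp only [pvGbLoop]
    split_ifs
    · exact ih (cb + 1) wr a
    · exact ih cb (wr - 1) a
    · rw [ih cb wr (a + cb * wr), ih cb wr (0 + cb * wr)]; ring
    · exact ih cb wr a

theorem pvMain (l : List Char) : ∀ (c co cow : Int),
    pvFaLoop l c co cow = cow + co * pvCountW l + pvGbLoop l c (pvCountW l) 0 := by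
  induction l with
  | nil => intro c co cow; simp [pvFaLoop, pvGbLoop, pvCountW]
  | cons x t ih =>
    intro c co cow
    by_cases h1 : x = 'C'
    · subst h1
      simp [pvFaLoop, pvGbLoop, pvCountW]
      rw [ih]
    · by_cases h2 : x = 'O'
      · subst h2
        simp [pvFaLoop, pvGbLoop, pvCountW, h1]
        rw [ih, pvGbLoop_add t c (pvCountW t) (c * pvCountW t)]
        ring
      · by_cases h3 : x = 'W'
        · subst h3
          simp [pvFaLoop, pvGbLoop, pvCountW, h1, h2]
          rw [ih]
          ring
        · simp [pvFaLoop, pvGbLoop, pvCountW, h1, h2, h3]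
          rw [ih]

-- ===== VERDICT (by name: the statement is the Claim_ definition above) =====
theorem follow_through_spec : Claim_equal_follow_through := by
  intro text _
  unfold Spec_follow_through follow_through follow_through_alt
  rw [pvMain]
  ring
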